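-- pv_equiv track=rewrite | github.com/Eric-Wonbin-Sang/StevensLTBots | General/Functions.py | string_to_command_list_list
-- ===== SOURCE A (Python) =====
-- def string_to_command_list_list(string, command_name_list):
--
--     raw_command_list = [part for part in string.lower().split(" ") if part != ""]
--
--     start_index = None
--     command_list_list = []
--     for c_i, command in enumerate(raw_command_list):
--         if command in command_name_list:
--             if start_index is not None:
--                 command_list_list.append(raw_command_list[start_index:c_i])
--             start_index = c_i
--     last_command_list = raw_command_list[start_index:]
--     if last_command_list:
--         command_list_list.append(last_command_list)
--     return command_list_list
-- ===== SOURCE B (Python) =====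
-- def string_to_command_list_list(string, command_name_list):
--     raw = [w for w in string.lower().split(" ") if w != ""]
--     boundary = [i for i, w in enumerate(raw) if w in command_name_list]
--     if not boundary:
--         return [raw] if raw else []
--     return [raw[a:b] for a, b in zip(boundary, boundary[1:] + [len(raw)])]
-- ===== Notes on version B (the rewrite author's own statement) =====
-- stated objective: alternative
-- what changed: Replaces the single pass that threads an optional start_index through the loop with a two-phase decomposition: first collect all boundary indices (positions of command words), then emit each group as a slice between consecutive boundaries (with len(raw) as the final sentinel end).
import Mathlib
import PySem

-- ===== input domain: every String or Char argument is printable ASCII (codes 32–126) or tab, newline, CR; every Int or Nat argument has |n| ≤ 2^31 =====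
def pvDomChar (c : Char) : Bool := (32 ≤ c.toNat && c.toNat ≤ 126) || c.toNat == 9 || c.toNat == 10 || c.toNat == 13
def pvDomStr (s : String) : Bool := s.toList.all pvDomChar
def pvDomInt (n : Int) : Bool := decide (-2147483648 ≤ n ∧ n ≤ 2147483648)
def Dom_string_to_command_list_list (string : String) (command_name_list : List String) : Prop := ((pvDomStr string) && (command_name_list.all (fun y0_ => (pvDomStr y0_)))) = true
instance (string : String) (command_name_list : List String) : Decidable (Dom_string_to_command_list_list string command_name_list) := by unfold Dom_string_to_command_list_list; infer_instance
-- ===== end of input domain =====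

-- B replaces A's start_index-threading single pass by a two-phase decomposition (collect all
-- boundary indices, then slice between consecutive boundaries); alternative structure, same cost.


-- ===== PORT A =====
def string_to_command_list_list (string : String) (command_name_list : List String) : List (List String) :=
  let raw_command_list :=
    ((PySem.Str.split? (PySem.Str.lower string) " ").getD []).filter (fun part => part ≠ "")
  let st := (PySem.List.enumerate raw_command_list 0).foldl
    (fun (s : Option Int × List (List String)) p =>
      if p.2 ∈ command_name_list then
        (some p.1,
          match s.1 with
          | some si => s.2 ++ [PySem.List.slice raw_command_list (some si) (some p.1)]
          | none => s.2)
      else s) (none, [])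
  let last_command_list := PySem.List.slice raw_command_list st.1 none
  if last_command_list.isEmpty then st.2 else st.2 ++ [last_command_list]

-- ===== PORT B =====
def string_to_command_list_list_alt (string : String) (command_name_list : List String) : List (List String) :=
  let raw :=
    ((PySem.Str.split? (PySem.Str.lower string) " ").getD []).filter (fun part => part ≠ "")
  let boundary := ((PySem.List.enumerate raw 0).filter (fun p => p.2 ∈ command_name_list)).map (·.1)
  if boundary.isEmpty then (if raw.isEmpty then [] else [raw])
  else (boundary.zip (PySem.List.slice boundary (some 1) none ++ [(raw.length : Int)])).map
        (fun ab => PySem.List.slice raw (some ab.1) (some ab.2))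

-- ===== PRECONDITION & SPEC =====
def Spec_string_to_command_list_list (string : String) (command_name_list : List String) (out : List (List String)) : Prop := out = string_to_command_list_list_alt string command_name_list
instance (string : String) (command_name_list : List String) (out : List (List String)) : Decidable (Spec_string_to_command_list_list string command_name_list out) := by unfold Spec_string_to_command_list_list; infer_instance

-- ===== CLAIM (what is proved, stated in full; the proofs are below) =====
def Claim_equal_string_to_command_list_list : Prop := ∀ (string : String) (command_name_list : List String), Dom_string_to_command_list_list string command_name_list → Spec_string_to_command_list_list string command_name_list (string_to_command_list_list string command_name_list)

-- ===== LEMMAS AND PROOFS =====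

/-- Boundary indices of a token list: positions whose token is a command name. -/
def pvBnd (cmds ys : List String) : List Int :=
  ((PySem.List.enumerate ys 0).filter (fun p => p.2 ∈ cmds)).map (·.1)

/-- A's loop result seen abstractly: last boundary and the closed segments. -/
def pvOpenSegs (raw : List String) : Int → List Int → Int × List (List String)
  | s, [] => (s, [])
  | s, b :: bs =>
      let r := pvOpenSegs raw b bs
      (r.1, PySem.List.slice raw (some s) (some b) :: r.2)

/-- All segments, the last one closed at `raw.length`. -/
def pvSegsE (raw : List String) : Int → List Int → List (List String)
  | s, [] => [PySem.List.slice raw (some s) (some (raw.length : Int))]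
  | s, b :: bs => PySem.List.slice raw (some s) (some b) :: pvSegsE raw b bs

/-- The value of A's fold state as a function of the boundary list. -/
def pvStateOf (raw : List String) : List Int → Option Int × List (List String)
  | [] => (none, [])
  | b :: bs => (some (pvOpenSegs raw b bs).1, (pvOpenSegs raw b bs).2)

theorem pvBnd_append (cmds ys : List String) (y : String) :
    pvBnd cmds (ys ++ [y]) =
      pvBnd cmds ys ++ (if y ∈ cmds then [(ys.length : Int)] else []) := by
  by_cases hy : y ∈ cmds <;>
    simp [pvBnd, PySem.List.enumerate_append, PySem.List.enumerate_cons,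
      List.filter_append, hy]

theorem pvBnd_bounds (cmds ys : List String) :
    ∀ i ∈ pvBnd cmds ys, 0 ≤ i ∧ i < (ys.length : Int) := by
  intro i hi
  simp only [pvBnd, List.mem_map, List.mem_filter] at hi
  obtain ⟨p, ⟨hp, _⟩, rfl⟩ := hi
  rw [PySem.List.mem_enumerate_iff] at hp
  obtain ⟨k, hk, rfl⟩ := hp
  constructor <;> simp
  omega

theorem pvOpenSegs_fst_mem (raw : List String) (b : Int) (bs : List Int) :
    (pvOpenSegs raw b bs).1 ∈ b :: bs := by
  induction bs generalizing b with
  | nil => simp [pvOpenSegs]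
  | cons b' bs ih =>
      have := ih b'
      simp [pvOpenSegs] at this ⊢
      tauto

theorem pvOpenSegs_append (raw : List String) (bs : List Int) (b i : Int) :
    pvOpenSegs raw b (bs ++ [i]) =
      (i, (pvOpenSegs raw b bs).2 ++
        [PySem.List.slice raw (some (pvOpenSegs raw b bs).1) (some i)]) := by
  induction bs generalizing b with
  | nil => simp [pvOpenSegs]
  | cons b' bs ih => simp [pvOpenSegs, ih b']

theorem pvSegsE_eq (raw : List String) (bs : List Int) (b : Int) :
    pvSegsE raw b bs =
      (pvOpenSegs raw b bs).2 ++
        [PySem.List.slice raw (some (pvOpenSegs raw b bs).1) (some (raw.length : Int))] := by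
  induction bs generalizing b with
  | nil => simp [pvSegsE, pvOpenSegs]
  | cons b' bs ih => simp [pvSegsE, pvOpenSegs, ih b']

/-- A's fold over the enumerated tokens equals the abstract state of its boundary list. -/
theorem pvFold_eq (raw cmds : List String) (ys : List String) :
    (PySem.List.enumerate ys 0).foldl
      (fun (s : Option Int × List (List String)) p =>
        if p.2 ∈ cmds then
          (some p.1,
            match s.1 with
            | some si => s.2 ++ [PySem.List.slice raw (some si) (some p.1)]
            | none => s.2)
        else s) (none, []) = pvStateOf raw (pvBnd cmds ys) := by
  induction ys using List.reverseRecOn with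
  | nil => simp [pvBnd, pvStateOf]
  | append_singleton ys y ih =>
      rw [PySem.List.enumerate_append, List.foldl_append, ih, pvBnd_append]
      by_cases hy : y ∈ cmds
      · cases hb : pvBnd cmds ys with
        | nil => simp [pvStateOf, PySem.List.enumerate_cons, hy, pvOpenSegs]
        | cons b bs =>
            simp [pvStateOf, PySem.List.enumerate_cons, hy, pvOpenSegs_append]
      · simp [PySem.List.enumerate_cons, hy]

/-- B's zip-slice build equals the segment list. -/
theorem pvZip_eq (raw : List String) (bs : List Int) (b : Int) :
    ((b :: bs).zip (bs ++ [(raw.length : Int)])).map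
        (fun ab => PySem.List.slice raw (some ab.1) (some ab.2)) =
      pvSegsE raw b bs := by
  induction bs generalizing b with
  | nil => simp [pvSegsE]
  | cons b' bs ih => simp [pvSegsE, ih b']

theorem pvSlice_from_eq (raw : List String) (s : Int) (h0 : 0 ≤ s) :
    PySem.List.slice raw (some s) none =
      PySem.List.slice raw (some s) (some (raw.length : Int)) := by
  rw [PySem.List.slice_from raw h0, PySem.List.slice_toNat raw h0 (by positivity)]
  rw [List.take_of_length_le (by simp)]

theorem pvSlice_from_ne_nil (raw : List String) (s : Int) (h0 : 0 ≤ s)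
    (h1 : s < (raw.length : Int)) :
    (PySem.List.slice raw (some s) none).isEmpty = false := by
  rw [PySem.List.slice_from raw h0]
  simp [List.drop_eq_nil_iff]
  omega

/-- A's loop and tail, let-free (definitionally the body of port A). -/
def pvFoldA (raw cmds : List String) : Option Int × List (List String) :=
  (PySem.List.enumerate raw 0).foldl
    (fun (s : Option Int × List (List String)) p =>
      if p.2 ∈ cmds then
        (some p.1,
          match s.1 with
          | some si => s.2 ++ [PySem.List.slice raw (some si) (some p.1)]
          | none => s.2)
      else s) (none, [])

def pvA (raw cmds : List String) : List (List String) :=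
  if (PySem.List.slice raw (pvFoldA raw cmds).1 none).isEmpty then (pvFoldA raw cmds).2
  else (pvFoldA raw cmds).2 ++ [PySem.List.slice raw (pvFoldA raw cmds).1 none]

def pvB (raw cmds : List String) : List (List String) :=
  if (pvBnd cmds raw).isEmpty then (if raw.isEmpty then [] else [raw])
  else ((pvBnd cmds raw).zip (PySem.List.slice (pvBnd cmds raw) (some 1) none ++ [(raw.length : Int)])).map
        (fun ab => PySem.List.slice raw (some ab.1) (some ab.2))

theorem pvMain (raw cmds : List String) : pvA raw cmds = pvB raw cmds := by
  unfold pvA pvB pvFoldA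
  rw [pvFold_eq raw cmds raw]
  rw [PySem.List.slice_from_one]
  cases hb : pvBnd cmds raw with
  | nil =>
      simp [pvStateOf, PySem.List.slice_none_none]
  | cons b bs =>
      have hmem := pvOpenSegs_fst_mem raw b bs
      have hbd := pvBnd_bounds cmds raw (pvOpenSegs raw b bs).1 (hb ▸ hmem)
      simp only [pvStateOf]
      rw [pvSlice_from_ne_nil raw _ hbd.1 hbd.2,
          pvSlice_from_eq raw _ hbd.1, ← pvSegsE_eq, ← pvZip_eq]
      simp

-- ===== VERDICT (by name: the statement is the Claim_ definition above) =====
theorem string_to_command_list_list_spec : Claim_equal_string_to_command_list_list := by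
  intro string cmds _
  unfold Spec_string_to_command_list_list
  exact pvMain (((PySem.Str.split? (PySem.Str.lower string) " ").getD []).filter (fun part => part ≠ "")) cmds
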